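-- pv_equiv track=rewrite | github.com/Ruminere/aoc-2021 | Problem01/Problem01.py | findGreaterTriple
-- ===== SOURCE A (Python) =====
-- def findGreaterTriple(nums):
--     result = 0
--     sum1 = 0;
--     sum2 = 0;
--     for i in range(3, len(nums)):
--         sum1 = nums[i-3] + nums[i-2] + nums[i-1]
--         sum2 = nums[i-2] + nums[i-1] + nums[i]
--         if (sum2 > sum1):
--             result += 1;
--     return result
-- ===== SOURCE B (Python) =====
-- def findGreaterTriple(nums):
--     # Telescoping: consecutive 3-windows share two terms, so
--     # window i+1 > window i  iff  the entering element beats the leaving one: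
--     # nums[i] > nums[i-3]. Count those pairs directly, no sums ever built.
--     return sum(b > a for a, b in zip(nums, nums[3:]))
-- ===== Notes on version B (the rewrite author's own statement) =====
-- stated objective: alternative
-- what changed: Uses the telescoping identity (consecutive 3-windows share two terms) to avoid computing any window sums at all: B just counts positions where nums[i] > nums[i-3] via zip(nums, nums[3:]), whereas A computes both triple sums each iteration and compares them.
import Mathlib
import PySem

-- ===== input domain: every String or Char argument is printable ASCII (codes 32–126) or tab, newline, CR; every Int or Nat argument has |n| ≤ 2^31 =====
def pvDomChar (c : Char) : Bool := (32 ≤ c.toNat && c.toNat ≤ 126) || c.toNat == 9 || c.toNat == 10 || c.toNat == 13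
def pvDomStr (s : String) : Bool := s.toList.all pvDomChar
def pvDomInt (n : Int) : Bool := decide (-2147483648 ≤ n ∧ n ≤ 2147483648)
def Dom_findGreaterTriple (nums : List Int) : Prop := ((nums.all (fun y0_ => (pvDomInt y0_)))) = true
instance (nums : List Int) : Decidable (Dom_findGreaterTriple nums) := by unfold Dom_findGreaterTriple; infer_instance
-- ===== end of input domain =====

-- B replaces A's per-step window-sum comparison with the telescoping identity: it never
-- builds a window sum and just counts positions where nums[i] > nums[i-3] (alternative, same cost).

-- ===== PORT A =====
-- A's fused loop over range(3, len(nums)); sum1/sum2 are reassigned before use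
-- each iteration, so the fold state is just `result`.
def findGreaterTriple (nums : List Int) : Int :=
  (PySem.List.pyRange 3 (nums.length : Int) 1).foldl
    (fun result i =>
      let sum1 := PySem.List.pyGetD nums (i - 3) 0 + PySem.List.pyGetD nums (i - 2) 0 +
                  PySem.List.pyGetD nums (i - 1) 0
      let sum2 := PySem.List.pyGetD nums (i - 2) 0 + PySem.List.pyGetD nums (i - 1) 0 +
                  PySem.List.pyGetD nums i 0
      if sum2 > sum1 then result + 1 else result) 0

-- ===== PORT B =====
-- sum(b > a for a, b in zip(nums, nums[3:])): booleans count as 1/0 in Python's sum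
def findGreaterTriple_alt (nums : List Int) : Int :=
  (nums.zip (PySem.List.slice nums (some 3) none)).foldl
    (fun acc p => acc + (if p.2 > p.1 then 1 else 0)) 0

-- ===== PRECONDITION & SPEC =====
def Spec_findGreaterTriple (nums : List Int) (out : Int) : Prop := out = findGreaterTriple_alt nums
instance (nums : List Int) (out : Int) : Decidable (Spec_findGreaterTriple nums out) := by unfold Spec_findGreaterTriple; infer_instance

-- ===== CLAIM =====
def Claim_equal_findGreaterTriple : Prop := ∀ (nums : List Int), Dom_findGreaterTriple nums → Spec_findGreaterTriple nums (findGreaterTriple nums)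

-- ===== LEMMAS AND PROOFS =====

-- zipping a list with its own drop-3 enumerates the pairs (nums[j], nums[j+3])
theorem pv_zip_drop3 (nums : List Int) :
    nums.zip (nums.drop 3)
      = (List.range (nums.length - 3)).map (fun j => (nums.getD j 0, nums.getD (j + 3) 0)) := by
  apply List.ext_getElem
  · simp
  · intro j h1 h2
    have hj : j + 3 < nums.length := by
      simp only [List.length_zip, List.length_drop] at h1; omega
    simp only [List.getElem_zip, List.getElem_drop, List.getElem_map, List.getElem_range,
               Prod.mk.injEq]
    constructor
    · rw [List.getD_eq_getElem nums 0 (by omega)]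
    · rw [List.getD_eq_getElem nums 0 hj]
      simp [Nat.add_comm]

-- ===== VERDICT =====
theorem findGreaterTriple_spec : Claim_equal_findGreaterTriple := by
  intro nums _
  unfold Spec_findGreaterTriple findGreaterTriple findGreaterTriple_alt
  have hs : PySem.List.slice nums (some 3) none = nums.drop 3 := by
    simpa using PySem.List.slice_from_natCast nums 3
  rw [hs, pv_zip_drop3, PySem.List.pyRange_one, List.foldl_map, List.foldl_map]
  have hK : ((nums.length : Int) - 3).toNat = nums.length - 3 := by omega
  rw [hK]
  apply PySem.List.foldl_congr_mem
  intro acc k hk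
  have hk3 : k < nums.length - 3 := List.mem_range.mp hk
  have e3 : (3 : Int) + (k : Int) = (((k + 3 : Nat) : Int)) := by push_cast; ring
  have e0 : (((k + 3 : Nat) : Int)) - 3 = ((k : Int)) := by push_cast; ring
  have e1 : (((k + 3 : Nat) : Int)) - 2 = (((k + 1 : Nat) : Int)) := by push_cast; ring
  have e2 : (((k + 3 : Nat) : Int)) - 1 = (((k + 2 : Nat) : Int)) := by push_cast; ring
  simp only [e3, e0, e1, e2, PySem.List.pyGetD_natCast]
  split_ifs with h1 h2 h2 <;> omega
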